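-- pv_equiv track=rewrite | github.com/martinr9315/ProbFSTA | over_under.py | split_into_nodes
-- ===== SOURCE A (Python) =====
-- def split_into_nodes(s):
--     tree = []
--     i = 0
--     while i < len(s):
--         label = ""
--         if s[i] == ')' or s[i] == '(':
--             tree.append(s[i])
--             i += 1
--         else:
--             j = i
--             while j < len(s) and s[j] != ')' and s[j] != '(':
--                 label += s[j]
--                 j += 1
--             i = j
--             tree.append(label)
--     return tree
-- ===== SOURCE B (Python) =====
-- import re
--
-- def split_into_nodes(s):
--     return re.findall(r'[()]|[^()]+', s)
-- ===== Notes on version B (the rewrite author's own statement) =====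
-- stated objective: faster
-- what changed: Replaced the manual index loop that builds each label by repeated string concatenation with a single regex findall matching either one parenthesis or a maximal run of non-parenthesis characters.
import Mathlib
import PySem

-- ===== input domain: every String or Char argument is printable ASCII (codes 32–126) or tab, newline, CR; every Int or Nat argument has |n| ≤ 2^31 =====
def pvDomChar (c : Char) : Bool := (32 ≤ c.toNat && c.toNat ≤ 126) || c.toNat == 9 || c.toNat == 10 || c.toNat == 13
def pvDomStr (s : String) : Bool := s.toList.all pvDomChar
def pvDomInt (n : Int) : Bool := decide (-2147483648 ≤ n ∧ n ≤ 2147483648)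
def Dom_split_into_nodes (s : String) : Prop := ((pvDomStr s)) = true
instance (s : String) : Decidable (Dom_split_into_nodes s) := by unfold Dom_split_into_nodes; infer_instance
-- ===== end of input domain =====

-- B replaces A's manual index loop and per-character label concatenation by a regex
-- findall ('[()]|[^()]+'): one parenthesis or a maximal non-parenthesis run per match.



-- ===== PORT A =====
-- A scans with index i; a paren becomes its own token, otherwise an inner
-- while accumulates a label character by character. Ported as recursion over
-- the remaining character list with the same inner accumulation loop.
def pvLabelLoop : List Char → List Char → (List Char × List Char)
  | [], label => ([], label)
  | c :: cs, label =>
      if c = ')' ∨ c = '(' then (c :: cs, label)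
      else pvLabelLoop cs (label ++ [c])

theorem pvLabelLoop_length (l acc : List Char) : (pvLabelLoop l acc).1.length ≤ l.length := by
  induction l generalizing acc with
  | nil => simp [pvLabelLoop]
  | cons c cs ih =>
      simp only [pvLabelLoop]
      split
      · simp
      · exact Nat.le_succ_of_le (ih _)

def pvGoA : List Char → List String
  | [] => []
  | c :: cs =>
      if c = ')' ∨ c = '(' then
        String.ofList [c] :: pvGoA cs
      else
        String.ofList (pvLabelLoop cs [c]).2 :: pvGoA (pvLabelLoop cs [c]).1
termination_by l => l.length
decreasing_by
  · simp
  · exact Nat.lt_succ_of_le (pvLabelLoop_length cs [c])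

def split_into_nodes (s : String) : List String := pvGoA s.toList

-- ===== PORT B =====
-- B is `re.findall(r'[()]|[^()]+', s)`: at each position the regex engine
-- matches either a single parenthesis or a maximal non-empty run of
-- non-parenthesis characters and restarts after the match.
def pvIsParen (c : Char) : Bool := c = '(' || c = ')'

def pvFindAll : List Char → List String
  | [] => []
  | c :: cs =>
      if pvIsParen c then
        -- alternative 1: [()]
        String.ofList [c] :: pvFindAll cs
      else
        -- alternative 2: [^()]+ , maximal match
        String.ofList (c :: cs.takeWhile (fun x => !pvIsParen x)) ::
          pvFindAll (cs.dropWhile (fun x => !pvIsParen x))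
termination_by l => l.length
decreasing_by
  · simp
  · exact Nat.lt_succ_of_le (List.length_dropWhile_le _ _)

def split_into_nodes_alt (s : String) : List String := pvFindAll s.toList

-- ===== PRECONDITION & SPEC =====
def Spec_split_into_nodes (s : String) (out : List String) : Prop := out = split_into_nodes_alt s
instance (s : String) (out : List String) : Decidable (Spec_split_into_nodes s out) := by unfold Spec_split_into_nodes; infer_instance

-- ===== CLAIM (what is proved, stated in full; the proofs are below) =====
def Claim_equal_split_into_nodes : Prop := ∀ (s : String), Dom_split_into_nodes s → Spec_split_into_nodes s (split_into_nodes s)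

-- ===== LEMMAS AND PROOFS =====

-- ===== VERDICT (by name: the statement is the Claim_ definition above) =====
theorem pvLabelLoop_eq (l acc : List Char) :
    pvLabelLoop l acc =
      (l.dropWhile (fun x => !pvIsParen x), acc ++ l.takeWhile (fun x => !pvIsParen x)) := by
  induction l generalizing acc with
  | nil => simp [pvLabelLoop]
  | cons c cs ih =>
      by_cases h : c = ')' ∨ c = '('
      · have hp : pvIsParen c = true := by
          rcases h with h | h <;> simp [pvIsParen, h]
        simp [pvLabelLoop, h, hp]
      · have hp : pvIsParen c = false := by
          simp [pvIsParen]
          exact ⟨fun h2 => h (Or.inr h2), fun h2 => h (Or.inl h2)⟩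
        simp [pvLabelLoop, h, hp, ih]

theorem pvGoA_eq_pvFindAll (l : List Char) : pvGoA l = pvFindAll l := by
  induction l using pvGoA.induct with
  | case1 => simp [pvGoA, pvFindAll]
  | case2 c cs h ih =>
      have hp : pvIsParen c = true := by
        rcases h with h | h <;> simp [pvIsParen, h]
      simp [pvGoA, pvFindAll, h, hp, ih]
  | case3 c cs h ih =>
      have hp : pvIsParen c = false := by
        simp [pvIsParen]
        exact ⟨fun h2 => h (Or.inr h2), fun h2 => h (Or.inl h2)⟩
      rw [pvLabelLoop_eq] at ih
      simp [pvGoA, pvFindAll, h, hp, pvLabelLoop_eq, ih]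

theorem split_into_nodes_spec : Claim_equal_split_into_nodes := by
  intro s _
  unfold Spec_split_into_nodes split_into_nodes split_into_nodes_alt
  exact pvGoA_eq_pvFindAll _
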